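-- pv_equiv track=rewrite | github.com/aymeric75/latplanDatasetGen | genBlocksworld.py | block_on_top
-- ===== SOURCE A (Python) =====
-- def block_on_top(block, state):
--     for s in state:
--         if type(s) is list:
--             if block in s:
--                 if block != s[0]:
--                     index_block_on_top = s.index(block) - 1
--                     return s[index_block_on_top]
--     return
-- ===== SOURCE B (Python) =====
-- def block_on_top(block, state):
--     above = {}
--     for s in state:
--         if type(s) is list:
--             for below, b in zip(s, s[1:]):
--                 above.setdefault(b, below)
--     return above.get(block)
-- ===== Notes on version B (the rewrite author's own statement) =====
-- stated objective: alternative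
-- what changed: Instead of scanning each stack with a membership test plus .index and early-returning, B builds an 'above' dict in one pass over all adjacent (below, b) pairs of every stack (setdefault keeps the first binding) and answers with a single dict lookup; Pre_ excludes states where the queried block sits at the top of some stack and is duplicated lower in that same stack, a duplicate-block corner where A's skip-the-whole-stack behaviour and B's first-pair binding are both accidental choices.
-- outside the precondition, e.g. on block_on_top(1, [[1, 2, 1]]): A returns None, B returns 2; on block_on_top(1, [[1, 3, 1], [2, 1]]): A returns 2, B returns 3
import Mathlib
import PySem

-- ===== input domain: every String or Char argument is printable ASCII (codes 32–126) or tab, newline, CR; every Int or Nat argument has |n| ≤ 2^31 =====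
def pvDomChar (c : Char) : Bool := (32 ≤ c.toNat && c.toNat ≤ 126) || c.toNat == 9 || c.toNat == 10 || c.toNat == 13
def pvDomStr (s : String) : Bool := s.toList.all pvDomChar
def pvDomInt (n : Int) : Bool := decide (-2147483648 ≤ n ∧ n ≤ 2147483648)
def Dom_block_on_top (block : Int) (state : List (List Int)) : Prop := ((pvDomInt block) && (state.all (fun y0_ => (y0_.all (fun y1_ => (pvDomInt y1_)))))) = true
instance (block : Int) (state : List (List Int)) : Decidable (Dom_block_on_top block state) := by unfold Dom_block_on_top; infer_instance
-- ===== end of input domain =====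

-- B replaces A's per-stack membership/.index scan with an 'above' table built once from adjacent pairs plus one dict lookup (objective: alternative decomposition, same cost).

-- ===== PORT A =====
-- A's early-returning 'for s in state' loop as structural recursion over state.
-- 'type(s) is list' is always true under the type convention (s : List Int), so the branch is kept trivially.
def blockOnTopGoA (block : Int) : List (List Int) → Option Int
  | [] => none
  | s :: rest =>
    if s.contains block then
      if some block ≠ PySem.List.pyGet? s 0 then    -- Python 'block != s[0]'; exact: the guard 'block in s' ensures s is nonempty
        match PySem.List.index? s block with
        | some i => PySem.List.pyGet? s ((i : Int) - 1)   -- s[s.index(block) - 1]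
        | none => none                                     -- unreachable: block ∈ s
      else blockOnTopGoA block rest
    else blockOnTopGoA block rest

def block_on_top (block : Int) (state : List (List Int)) : Option Int :=
  blockOnTopGoA block state

-- ===== PORT B =====
-- 'for below, b in zip(s, s[1:]): above.setdefault(b, below)' then 'above.get(block)'
def block_on_top_alt (block : Int) (state : List (List Int)) : Option Int :=
  let above : PySem.Dict Int Int :=
    state.foldl (fun d s =>
      (s.zip s.tail).foldl (fun d p => d.setdefault p.2 p.1) d)
      PySem.Dict.empty
  above.get? block

-- ===== PRECONDITION & SPEC =====
-- Pre_ excludes states in which the queried block is the top element of some stack and is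
-- duplicated lower in that same stack: on such duplicate-block states A skips the whole stack
-- while B binds the block at its first lower occurrence, and neither value is specified.
def Pre_block_on_top (block : Int) (state : List (List Int)) : Prop :=
  ∀ s ∈ state, s.head? = some block → block ∉ s.tail
instance (block : Int) (state : List (List Int)) : Decidable (Pre_block_on_top block state) := by
  unfold Pre_block_on_top; infer_instance

def pvWitness_block_on_top : Int × List (List Int) := (1, [[2, 1], [3]])

def Spec_block_on_top (block : Int) (state : List (List Int)) (out : Option Int) : Prop := out = block_on_top_alt block state
instance (block : Int) (state : List (List Int)) (out : Option Int) : Decidable (Spec_block_on_top block state out) := by unfold Spec_block_on_top; infer_instance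

-- ===== CLAIM (what is proved, stated in full; the proofs are below) =====
def Claim_equal_block_on_top : Prop := ∀ (block : Int) (state : List (List Int)), Dom_block_on_top block state → Pre_block_on_top block state → Spec_block_on_top block state (block_on_top block state)

-- ===== LEMMAS AND PROOFS =====

-- Folding setdefault over a stack's pairs: the final lookup is the old binding, else the first pair keyed by 'block'.
lemma fold_setdefault_get (block : Int) :
    ∀ (ps : List (Int × Int)) (d : PySem.Dict Int Int),
      (ps.foldl (fun d p => d.setdefault p.2 p.1) d).get? block
        = (d.get? block).or ((ps.find? (fun p => p.2 == block)).map Prod.fst) := by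
  intro ps
  induction ps with
  | nil => intro d; simp
  | cons p ps ih =>
    intro d
    rw [List.foldl_cons, ih]
    by_cases hb : p.2 = block
    · subst hb
      rw [PySem.Dict.get?_setdefault_self,
        List.find?_cons_of_pos (by simp), Option.map_some]
      cases hd : d.get? p.2 <;> simp
    · rw [PySem.Dict.get?_setdefault_of_ne d p.1 (fun h => hb h.symm),
        List.find?_cons_of_neg (by simp [hb])]

-- First pair of zip (a::t, t) whose upper element is 'block', as an index into t.
lemma zip_find_eq_index (block : Int) :
    ∀ (t : List Int) (a : Int),
      (((a :: t).zip t).find? (fun p => p.2 == block)).map Prod.fst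
        = (PySem.List.index? t block).bind (fun k => (a :: t)[k]?) := by
  intro t
  induction t with
  | nil => intro a; simp [PySem.List.index?]
  | cons b t' ih =>
    intro a
    by_cases hb : b = block
    · subst hb
      rw [PySem.List.index?_cons_self]
      simp [List.zip]
    · rw [PySem.List.index?_cons_of_ne t' hb, List.zip_cons_cons,
        List.find?_cons_of_neg (by simp [hb]), ih b]
      cases PySem.List.index? t' block <;> simp

-- A's per-stack branch equals B's first matching pair of that stack (under Pre_'s no-top-duplicate condition).
lemma goA_cons (block : Int) (s : List Int) (rest : List (List Int))
    (hpre : s.head? = some block → block ∉ s.tail) :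
    blockOnTopGoA block (s :: rest)
      = ((((s.zip s.tail).find? (fun p => p.2 == block)).map Prod.fst).or
          (blockOnTopGoA block rest)) := by
  cases s with
  | nil => simp [blockOnTopGoA]
  | cons a t =>
    have hget : PySem.List.pyGet? (a :: t) 0 = some a := by
      simp [PySem.List.pyGet?, PySem.List.pyIdx?]
    by_cases hab : a = block
    · subst hab
      have hnt : a ∉ t := hpre rfl
      have hpred : ∀ p ∈ ((a :: t).zip t),
          ¬ ((p.2 == a) = true) := by
        intro p hp h
        exact hnt (by
          have := List.of_mem_zip hp
          simpa [eq_of_beq h] using this.2)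
      rw [List.tail_cons, List.find?_eq_none.mpr hpred]
      simp [blockOnTopGoA]
    · have hba : block ≠ a := fun h => hab h.symm
      rw [List.tail_cons, zip_find_eq_index block t a]
      by_cases hmem : block ∈ t
      · obtain ⟨k, hk⟩ := Option.isSome_iff_exists.mp ((PySem.List.index?_isSome_iff t block).mpr hmem)
        obtain ⟨hklt, -, -⟩ := PySem.List.getElem_of_index?_eq_some hk
        have hidx : PySem.List.index? (a :: t) block = some (k + 1) := by
          rw [PySem.List.index?_cons_of_ne t hab, hk]; rfl
        have hgetk : PySem.List.pyGet? (a :: t) ((k : Nat) : Int) = (a :: t)[k]? := by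
          simp [pysem]
        have hv : (a :: t)[k]? = some ((a :: t)[k]'(Nat.lt_succ_of_lt hklt)) :=
          List.getElem?_eq_getElem _
        rw [PySem.List.index?_eq_idxOf?] at hidx hk
        simp [blockOnTopGoA, hba, hmem, hidx, hk, hgetk, hv]
      · have hidx : PySem.List.index? t block = none := (PySem.List.index?_eq_none_iff t block).mpr hmem
        rw [PySem.List.index?_eq_idxOf?] at hidx
        simp [blockOnTopGoA, hba, hmem, hidx]

-- Folding B's per-stack step over the whole state: lookup = old binding, else A's scan result.
lemma fold_state_get (block : Int) :
    ∀ (L : List (List Int)), (∀ s ∈ L, s.head? = some block → block ∉ s.tail) →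
      ∀ (d : PySem.Dict Int Int),
      (L.foldl (fun d s =>
          (s.zip s.tail).foldl (fun d p => d.setdefault p.2 p.1) d) d).get? block
        = (d.get? block).or (blockOnTopGoA block L) := by
  intro L
  induction L with
  | nil => intro _ d; simp [blockOnTopGoA]
  | cons s rest ih =>
    intro hpre d
    rw [List.foldl_cons, ih (fun s hs => hpre s (List.mem_cons_of_mem _ hs)),
      fold_setdefault_get block, goA_cons block s rest (hpre s (List.mem_cons_self)),
      Option.or_assoc]

-- ===== VERDICT (by name: the statement is the Claim_ definition above) =====
theorem block_on_top_spec : Claim_equal_block_on_top := by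
  intro block state _ hpre
  unfold Spec_block_on_top block_on_top block_on_top_alt
  rw [fold_state_get block state hpre PySem.Dict.empty]
  simp
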